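-- pv_equiv track=rewrite | github.com/LittlePyx/Pi_zaya | api/reference_ui.py | _surface_has_focus_token_sequence
-- ===== SOURCE A (Python) =====
-- def _surface_has_focus_token_sequence(surface_tokens: list[str], term_tokens: list[str]) -> bool:
--     if (not surface_tokens) or (not term_tokens) or (len(term_tokens) > len(surface_tokens)):
--         return False
--     width = len(term_tokens)
--     for idx in range(len(surface_tokens) - width + 1):
--         if surface_tokens[idx : idx + width] == term_tokens:
--             return True
--     return False
-- ===== SOURCE B (Python) =====
-- def _surface_has_focus_token_sequence(surface_tokens: list[str], term_tokens: list[str]) -> bool: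
--     if not term_tokens:
--         return False
--     m = len(term_tokens)
--     active = []  # lengths of partial matches ending at the current position
--     for tok in surface_tokens:
--         nxt = []
--         for l in active:
--             if term_tokens[l] == tok:
--                 if l + 1 == m:
--                     return True
--                 nxt.append(l + 1)
--         if term_tokens[0] == tok:
--             if m == 1:
--                 return True
--             nxt.append(1)
--         active = nxt
--     return False
-- ===== Notes on version B (the rewrite author's own statement) =====
-- stated objective: alternative
-- what changed: Replaces A's scan over every start position with a fresh slice comparison per window by a single left-to-right pass that simulates the pattern NFA, threading the set of active partial-match lengths through one accumulator and never revisiting earlier tokens.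
import Mathlib
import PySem

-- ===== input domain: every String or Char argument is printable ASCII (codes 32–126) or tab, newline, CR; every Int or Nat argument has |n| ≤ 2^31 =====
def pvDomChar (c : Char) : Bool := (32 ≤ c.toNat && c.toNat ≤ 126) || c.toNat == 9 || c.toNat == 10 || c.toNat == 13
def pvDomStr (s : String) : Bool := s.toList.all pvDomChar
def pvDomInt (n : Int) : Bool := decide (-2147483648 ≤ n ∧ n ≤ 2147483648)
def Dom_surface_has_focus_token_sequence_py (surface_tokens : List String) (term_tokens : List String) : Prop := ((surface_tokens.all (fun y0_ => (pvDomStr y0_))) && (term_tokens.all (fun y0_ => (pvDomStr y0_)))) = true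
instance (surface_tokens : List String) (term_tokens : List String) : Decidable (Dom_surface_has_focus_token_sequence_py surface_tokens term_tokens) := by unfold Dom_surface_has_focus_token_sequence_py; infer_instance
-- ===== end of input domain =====

-- B replaces A's scan over all start positions (comparing a slice at each) by a single
-- left-to-right pass that maintains the set of active partial-match lengths (NFA simulation);
-- same worst-case cost class, different algorithm — no speed claim.

-- ===== PORT A =====
def surface_has_focus_token_sequence_py (surface_tokens : List String) (term_tokens : List String) : Bool :=
  if surface_tokens.isEmpty || term_tokens.isEmpty
      || decide ((term_tokens.length : Int) > (surface_tokens.length : Int)) then false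
  else
    let width : Int := term_tokens.length
    (PySem.List.pyRange 0 ((surface_tokens.length : Int) - width + 1) 1).foldl
      (fun acc idx =>
        acc || (PySem.List.slice surface_tokens (some idx) (some (idx + width)) == term_tokens))
      false

-- ===== PORT B =====
-- Source B's inner loop over `active`: builds `nxt`; `none` models the early `return True`
-- (term_tokens[l] is always in range here, so getD is exact)
def pvNext (t : List String) (tok : String) : List Nat → Option (List Nat)
  | [] => some []
  | l :: ls =>
      if t.getD l "" == tok then
        if l + 1 = t.length then none
        else (pvNext t tok ls).map (fun r => (l + 1) :: r)
      else pvNext t tok ls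

-- Source B's body of the `for tok` loop after the inner loop: the term_tokens[0] restart check
def pvStep (t : List String) (tok : String) (active : List Nat) : Option (List Nat) :=
  match pvNext t tok active with
  | none => none
  | some nxt =>
      if t.getD 0 "" == tok then
        if t.length = 1 then none else some (nxt ++ [1])
      else some nxt

-- Source B's `for tok in surface_tokens` loop threading `active`
def pvRun (t : List String) : List String → List Nat → Bool
  | [], _ => false
  | tok :: rest, active =>
      match pvStep t tok active with
      | none => true
      | some nxt => pvRun t rest nxt

def surface_has_focus_token_sequence_py_alt (surface_tokens : List String) (term_tokens : List String) : Bool :=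
  if term_tokens.isEmpty then false
  else pvRun term_tokens surface_tokens []

-- ===== PRECONDITION & SPEC =====
def Spec_surface_has_focus_token_sequence_py (surface_tokens : List String) (term_tokens : List String) (out : Bool) : Prop := out = surface_has_focus_token_sequence_py_alt surface_tokens term_tokens
instance (surface_tokens : List String) (term_tokens : List String) (out : Bool) : Decidable (Spec_surface_has_focus_token_sequence_py surface_tokens term_tokens out) := by unfold Spec_surface_has_focus_token_sequence_py; infer_instance

-- ===== CLAIM (what is proved, stated in full; the proofs are below) =====
def Claim_equal_surface_has_focus_token_sequence_py : Prop := ∀ (surface_tokens : List String) (term_tokens : List String), Dom_surface_has_focus_token_sequence_py surface_tokens term_tokens → Spec_surface_has_focus_token_sequence_py surface_tokens term_tokens (surface_has_focus_token_sequence_py surface_tokens term_tokens)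

-- ===== LEMMAS AND PROOFS =====

-- invariant: `active` holds exactly the partial-match lengths at the end of the consumed prefix u
def pvInv (t u : List String) (active : List Nat) : Prop :=
  ∀ l : Nat, l ∈ active ↔ (1 ≤ l ∧ l < t.length ∧ t.take l <:+ u)

lemma pvNext_eq_none_iff (t : List String) (x : String) (active : List Nat) :
    pvNext t x active = none ↔ ∃ l ∈ active, t.getD l "" = x ∧ l + 1 = t.length := by
  induction active with
  | nil => simp [pvNext]
  | cons a as ih =>
    by_cases h1 : t.getD a "" == x
    · by_cases h2 : a + 1 = t.length
      · have heq : pvNext t x (a :: as) = none := by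
          simp only [pvNext]; rw [if_pos h1, if_pos h2]
        rw [heq]
        exact ⟨fun _ => ⟨a, List.mem_cons_self, beq_iff_eq.mp h1, h2⟩, fun _ => rfl⟩
      · have heq : pvNext t x (a :: as) = (pvNext t x as).map (fun r => (a + 1) :: r) := by
          simp only [pvNext]; rw [if_pos h1, if_neg h2]
        rw [heq, Option.map_eq_none_iff, ih]
        simp only [List.mem_cons]
        constructor
        · rintro ⟨l, hl, h⟩; exact ⟨l, Or.inr hl, h⟩
        · rintro ⟨l, hl | hl, h⟩
          · subst hl; exact absurd h.2 h2
          · exact ⟨l, hl, h⟩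
    · have heq : pvNext t x (a :: as) = pvNext t x as := by
        simp only [pvNext]; rw [if_neg h1]
      rw [heq, ih]
      simp only [List.mem_cons]
      constructor
      · rintro ⟨l, hl, h⟩; exact ⟨l, Or.inr hl, h⟩
      · rintro ⟨l, hl | hl, h⟩
        · subst hl; exact absurd (beq_iff_eq.mpr h.1) h1
        · exact ⟨l, hl, h⟩

lemma pvNext_eq_some_mem (t : List String) (x : String) (active : List Nat) (r : List Nat)
    (h : pvNext t x active = some r) (l' : Nat) :
    l' ∈ r ↔ ∃ l ∈ active, t.getD l "" = x ∧ l + 1 ≠ t.length ∧ l' = l + 1 := by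
  induction active generalizing r with
  | nil =>
    simp only [pvNext, Option.some.injEq] at h
    subst h; simp
  | cons a as ih =>
    by_cases h1 : t.getD a "" == x
    · by_cases h2 : a + 1 = t.length
      · have heq : pvNext t x (a :: as) = none := by
          simp only [pvNext]; rw [if_pos h1, if_pos h2]
        rw [heq] at h
        exact absurd h (by simp)
      · have heq : pvNext t x (a :: as) = (pvNext t x as).map (fun r => (a + 1) :: r) := by
          simp only [pvNext]; rw [if_pos h1, if_neg h2]
        rw [heq] at h
        rcases Option.map_eq_some_iff.mp h with ⟨r', hr', hr⟩
        subst hr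
        simp only [List.mem_cons, ih r' hr']
        constructor
        · rintro (rfl | ⟨l, hl, h⟩)
          · exact ⟨a, Or.inl rfl, beq_iff_eq.mp h1, h2, rfl⟩
          · exact ⟨l, Or.inr hl, h⟩
        · rintro ⟨l, rfl | hl, hx, hne, rfl⟩
          · exact Or.inl rfl
          · exact Or.inr ⟨l, hl, hx, hne, rfl⟩
    · have heq : pvNext t x (a :: as) = pvNext t x as := by
        simp only [pvNext]; rw [if_neg h1]
      rw [heq] at h
      rw [ih r h]
      constructor
      · rintro ⟨l, hl, h⟩; exact ⟨l, List.mem_cons_of_mem _ hl, h⟩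
      · rintro ⟨l, hl, hx, hrest⟩
        rcases List.mem_cons.mp hl with rfl | hl
        · exact absurd (beq_iff_eq.mpr hx) h1
        · exact ⟨l, hl, hx, hrest⟩

-- "take l' of t is a suffix of u ++ [x]" unfolds one step, for 1 ≤ l' ≤ |t|
lemma take_suffix_concat (t u : List String) (x : String) (l' : Nat)
    (h1 : 1 ≤ l') (h2 : l' ≤ t.length) :
    (t.take l' <:+ u ++ [x]) ↔ (t.take (l' - 1) <:+ u ∧ t.getD (l' - 1) "" = x) := by
  have hlen : (t.take l').length = l' := by rw [List.length_take]; omega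
  have hlt1 : l' - 1 < t.length := by omega
  have hget : t[l' - 1]? = some (t.getD (l' - 1) "") := by
    rw [List.getElem?_eq_getElem hlt1, List.getD_eq_getElem t "" hlt1]
  have hsplit : t.take l' = t.take (l' - 1) ++ [t.getD (l' - 1) ""] := by
    have : l' - 1 + 1 = l' := by omega
    rw [← this, List.take_add_one, hget]
    rfl
  constructor
  · intro h
    rcases List.suffix_concat_iff.mp h with he | ⟨w, hw, hsuf⟩
    · rw [he] at hlen; simp at hlen; omega
    · have hxeq : t.getD (l' - 1) "" = x := by
        have := congrArg List.getLast? (hsplit.symm.trans hw)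
        simpa using this
      refine ⟨?_, hxeq⟩
      have : t.take (l' - 1) = w := by
        have := hsplit.symm.trans hw
        rw [hxeq] at this
        exact List.append_inj_left' this rfl
      rwa [this]
  · rintro ⟨hsuf, hx⟩
    rw [hsplit, hx]
    obtain ⟨q, hq⟩ := hsuf
    exact ⟨q, by rw [← List.append_assoc, hq]⟩

lemma pvStep_none_iff (t u : List String) (x : String) (active : List Nat)
    (ht : t ≠ []) (hinv : pvInv t u active) :
    pvStep t x active = none ↔ t <:+ u ++ [x] := by
  have hm : 1 ≤ t.length := List.length_pos_iff.mpr ht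
  have hkey := take_suffix_concat t u x t.length hm le_rfl
  rw [List.take_length] at hkey
  unfold pvStep
  rcases hn : pvNext t x active with _ | nxt
  · simp only [true_iff]
    obtain ⟨l, hl, hx, hlen⟩ := (pvNext_eq_none_iff t x active).mp hn
    have := (hinv l).mp hl
    rw [hkey]
    have hl1 : t.length - 1 = l := by omega
    rw [hl1]
    exact ⟨this.2.2, hx⟩
  · have hnone : ¬ ∃ l ∈ active, t.getD l "" = x ∧ l + 1 = t.length := by
      rw [← pvNext_eq_none_iff t x active, hn]; simp
    by_cases h0 : t.getD 0 "" == x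
    · by_cases hl1 : t.length = 1
      · simp only [h0, hl1, if_pos, true_iff]
        rw [hkey, hl1]
        exact ⟨by simp, by simpa [hl1] using beq_iff_eq.mp h0⟩
      · simp only [h0, if_true, if_neg hl1, reduceCtorEq, false_iff]
        rw [hkey]
        rintro ⟨hsuf, hx⟩
        exact hnone ⟨t.length - 1, (hinv _).mpr ⟨by omega, by omega, hsuf⟩, hx, by omega⟩
    · simp only [h0, if_false, reduceCtorEq, false_iff]
      rw [hkey]
      rintro ⟨hsuf, hx⟩
      by_cases hl1 : t.length = 1
      · rw [hl1] at hx; simp at hx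
        exact absurd (beq_iff_eq.mpr hx) h0
      · exact hnone ⟨t.length - 1, (hinv _).mpr ⟨by omega, by omega, hsuf⟩, hx, by omega⟩

lemma pvStep_some_inv (t u : List String) (x : String) (active : List Nat) (r : List Nat)
    (ht : t ≠ []) (hinv : pvInv t u active)
    (h : pvStep t x active = some r) : pvInv t (u ++ [x]) r := by
  have hm : 1 ≤ t.length := List.length_pos_iff.mpr ht
  intro l'
  unfold pvStep at h
  rcases hn : pvNext t x active with _ | nxt
  · rw [hn] at h; exact absurd h (by simp)
  · rw [hn] at h
    replace h : (if t.getD 0 "" == x then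
        if t.length = 1 then none else some (nxt ++ [1]) else some nxt) = some r := h
    have hmem := pvNext_eq_some_mem t x active nxt hn
    have hnxt1 : ¬ (1 ∈ nxt) := by
      rw [hmem 1]
      rintro ⟨l, hl, -, -, hl'⟩
      have := ((hinv l).mp hl).1
      omega
    -- characterize membership in nxt semantically, for l' ≥ 2
    have hsem : ∀ l'' : Nat, 2 ≤ l'' →
        (l'' ∈ nxt ↔ (1 ≤ l'' ∧ l'' < t.length ∧ t.take l'' <:+ u ++ [x])) := by
      intro l'' h2
      rw [hmem l'']
      constructor
      · rintro ⟨l, hl, hx, hne, rfl⟩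
        obtain ⟨hl1, hlm, hsuf⟩ := (hinv l).mp hl
        refine ⟨by omega, by omega, ?_⟩
        rw [take_suffix_concat t u x (l + 1) (by omega) (by omega)]
        exact ⟨by simpa using hsuf, by simpa using hx⟩
      · rintro ⟨h1, hlt, hsuf⟩
        rw [take_suffix_concat t u x l'' (by omega) (by omega)] at hsuf
        refine ⟨l'' - 1, (hinv _).mpr ⟨by omega, by omega, hsuf.1⟩, hsuf.2, by omega, by omega⟩
    -- the l' = 1 target
    have hone : (1 ≤ (1:Nat) ∧ 1 < t.length ∧ t.take 1 <:+ u ++ [x]) ↔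
        (t.getD 0 "" = x ∧ t.length ≠ 1) := by
      constructor
      · rintro ⟨-, hlt, hsuf⟩
        rw [take_suffix_concat t u x 1 le_rfl (by omega)] at hsuf
        exact ⟨hsuf.2, by omega⟩
      · rintro ⟨hx, hne⟩
        refine ⟨le_rfl, by omega, ?_⟩
        rw [take_suffix_concat t u x 1 le_rfl (by omega)]
        exact ⟨by simp, hx⟩
    by_cases h0 : t.getD 0 "" == x
    · by_cases hl1 : t.length = 1
      · rw [if_pos h0, if_pos hl1] at h; exact absurd h (by simp)
      · rw [if_pos h0, if_neg hl1, Option.some.injEq] at h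
        subst h
        rw [List.mem_append, List.mem_singleton]
        rcases Nat.lt_or_ge l' 2 with hlt | hge
        · interval_cases l'
          · simp only [Nat.le_zero] at *
            constructor
            · rintro (h | h)
              · exact absurd ((hmem 0).mp h) (by rintro ⟨l, -, -, -, h⟩; omega)
              · omega
            · rintro ⟨h, -⟩; omega
          · constructor
            · intro _; exact hone.mpr ⟨beq_iff_eq.mp h0, hl1⟩
            · intro _; exact Or.inr rfl
        · rw [hsem l' hge]
          constructor
          · rintro (h | h)
            · exact h
            · omega
          · exact Or.inl
    · rw [if_neg h0, Option.some.injEq] at h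
      subst h
      rcases Nat.lt_or_ge l' 2 with hlt | hge
      · interval_cases l'
        · constructor
          · intro h; exact absurd ((hmem 0).mp h) (by rintro ⟨l, -, -, -, h⟩; omega)
          · rintro ⟨h, -⟩; omega
        · constructor
          · intro h; exact absurd h hnxt1
          · intro h
            exact absurd (hone.mp h).1 (fun hh => h0 (beq_iff_eq.mpr hh))
      · exact hsem l' hge

lemma pvRun_iff (t : List String) (ht : t ≠ []) :
    ∀ (rest u : List String) (active : List Nat), pvInv t u active →
      (pvRun t rest active = true ↔ ∃ v, v <+: rest ∧ v ≠ [] ∧ t <:+ u ++ v) := by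
  intro rest
  induction rest with
  | nil =>
    intro u active _
    simp only [pvRun, Bool.false_eq_true, false_iff]
    rintro ⟨v, hv, hne, -⟩
    exact hne (List.prefix_nil.mp hv)
  | cons x rest ih =>
    intro u active hinv
    have hsplit : (∃ v, v <+: x :: rest ∧ v ≠ [] ∧ t <:+ u ++ v) ↔
        (t <:+ u ++ [x]) ∨ (∃ v', v' <+: rest ∧ v' ≠ [] ∧ t <:+ (u ++ [x]) ++ v') := by
      constructor
      · rintro ⟨v, hv, hne, hsuf⟩
        rcases List.prefix_cons_iff.mp hv with rfl | ⟨v', rfl, hv'⟩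
        · exact absurd rfl hne
        · rcases eq_or_ne v' [] with rfl | hne'
          · exact Or.inl hsuf
          · exact Or.inr ⟨v', hv', hne', by rwa [List.append_assoc, List.singleton_append]⟩
      · rintro (h | ⟨v', hv', hne', hsuf⟩)
        · exact ⟨[x], List.prefix_cons_iff.mpr (Or.inr ⟨[], rfl, List.nil_prefix⟩), by simp, h⟩
        · exact ⟨x :: v', List.prefix_cons_iff.mpr (Or.inr ⟨v', rfl, hv'⟩), by simp,
            by rwa [List.append_assoc, List.singleton_append] at hsuf⟩
    rw [hsplit]
    show (match pvStep t x active with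
          | none => true
          | some nxt => pvRun t rest nxt) = true ↔ _
    rcases hs : pvStep t x active with _ | nxt
    · simp only [true_iff]
      exact Or.inl ((pvStep_none_iff t u x active ht hinv).mp hs)
    · have hnotc : ¬ (t <:+ u ++ [x]) := by
        rw [← pvStep_none_iff t u x active ht hinv, hs]; simp
      rw [ih (u ++ [x]) nxt (pvStep_some_inv t u x active nxt ht hinv hs)]
      constructor
      · exact Or.inr
      · rintro (h | h)
        · exact absurd h hnotc
        · exact h

lemma alt_iff_infix (s t : List String) (ht : t ≠ []) :
    surface_has_focus_token_sequence_py_alt s t = true ↔ t <:+: s := by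
  have hE : t.isEmpty = false := by simpa [List.isEmpty_eq_false_iff] using ht
  unfold surface_has_focus_token_sequence_py_alt
  rw [hE, if_neg (by simp)]
  have hinv0 : pvInv t [] [] := by
    intro l
    simp only [List.mem_nil_iff, false_iff]
    rintro ⟨h1, h2, hsuf⟩
    have := List.eq_nil_of_suffix_nil hsuf
    have : (t.take l).length = 0 := by rw [this]; rfl
    rw [List.length_take] at this
    omega
  rw [pvRun_iff t ht s [] [] hinv0]
  constructor
  · rintro ⟨v, hv, -, hsuf⟩
    rw [List.nil_append] at hsuf
    exact List.IsInfix.trans hsuf.isInfix hv.isInfix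
  · rintro ⟨p, q, rfl⟩
    refine ⟨p ++ t, ⟨q, by simp⟩, by simp [ht], ?_⟩
    rw [List.nil_append]
    exact ⟨p, rfl⟩

lemma infix_iff_exists_drop_prefix (t s : List String) :
    t <:+: s ↔ ∃ k, t <+: s.drop k := by
  constructor
  · rintro ⟨l, r, rfl⟩
    exact ⟨l.length, by simp⟩
  · rintro ⟨k, hk⟩
    exact List.IsInfix.trans hk.isInfix (List.drop_suffix k s).isInfix

lemma foldl_or_any {α : Type} (l : List α) (p : α → Bool) (b : Bool) :
    l.foldl (fun acc i => acc || p i) b = (b || l.any p) := by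
  induction l generalizing b with
  | nil => simp
  | cons x xs ih => simp [List.foldl, ih, Bool.or_assoc]

-- ===== VERDICT (by name: the statement is the Claim_ definition above) =====
theorem surface_has_focus_token_sequence_py_spec : Claim_equal_surface_has_focus_token_sequence_py := by
  intro s t _
  show surface_has_focus_token_sequence_py s t = surface_has_focus_token_sequence_py_alt s t
  by_cases hg : s.isEmpty || t.isEmpty || decide ((t.length : Int) > (s.length : Int))
  · -- A returns false on the guard; show B does too
    rw [surface_has_focus_token_sequence_py, if_pos hg]
    simp only [Bool.or_eq_true, decide_eq_true_eq, List.isEmpty_iff] at hg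
    rcases hg with (hs | ht) | hlen
    · subst hs
      unfold surface_has_focus_token_sequence_py_alt
      split
      · rfl
      · rw [eq_comm]
        show pvRun t [] [] = false
        rfl
    · simp [surface_has_focus_token_sequence_py_alt, ht]
    · have hlen' : s.length < t.length := by exact_mod_cast hlen
      rcases eq_or_ne t [] with rfl | hne
      · simp [surface_has_focus_token_sequence_py_alt]
      · rw [eq_comm, Bool.eq_false_iff, Ne, alt_iff_infix s t hne]
        intro hinf
        exact absurd hinf.length_le (by omega)
  · rw [surface_has_focus_token_sequence_py, if_neg hg]
    simp only [Bool.or_eq_true, decide_eq_true_eq, List.isEmpty_iff, not_or, not_lt] at hg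
    obtain ⟨⟨hs, ht⟩, hlen⟩ := hg
    have hlen' : t.length ≤ s.length := by exact_mod_cast hlen
    show (PySem.List.pyRange 0 ((s.length : Int) - (t.length : Int) + 1) 1).foldl
        (fun acc idx =>
          acc || (PySem.List.slice s (some idx) (some (idx + (t.length : Int))) == t))
        false = surface_has_focus_token_sequence_py_alt s t
    have hcast : (s.length : Int) - (t.length : Int) + 1 = ((s.length - t.length + 1 : Nat) : Int) := by
      push_cast [Nat.sub_add_cancel]
      omega
    rw [hcast, PySem.List.pyRange_zero_natCast, foldl_or_any, Bool.false_or]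
    rw [Bool.eq_iff_iff, List.any_eq_true, alt_iff_infix s t ht]
    constructor
    · rintro ⟨i, hi, hslice⟩
      obtain ⟨k, -, rfl⟩ := List.mem_map.mp hi
      rw [show ((k : Int) + (t.length : Int)) = ((k : Nat) : Int) + ((t.length : Nat) : Int) from rfl,
          PySem.List.slice_natCast_add, beq_iff_eq] at hslice
      apply (infix_iff_exists_drop_prefix t s).mpr
      refine ⟨k, ?_⟩
      rw [List.prefix_iff_eq_take]
      exact hslice.symm
    · intro hinf
      obtain ⟨k, hk⟩ := (infix_iff_exists_drop_prefix t s).mp hinf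
      have hkle : t.length ≤ (s.drop k).length := hk.length_le
      rw [List.length_drop] at hkle
      have htlen : 1 ≤ t.length := List.length_pos_iff.mpr ht
      refine ⟨(k : Int), ?_, ?_⟩
      · exact List.mem_map.mpr ⟨k, List.mem_range.mpr (by omega), rfl⟩
      · rw [show ((k : Int) + (t.length : Int)) = ((k : Nat) : Int) + ((t.length : Nat) : Int) from rfl,
            PySem.List.slice_natCast_add, beq_iff_eq]
        rw [List.prefix_iff_eq_take] at hk
        exact hk.symm
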